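-- pv_equiv track=rewrite | github.com/autotest/virt-test | virttest/utils_gdb.py | _split_result_str
-- ===== SOURCE A (Python) =====
-- def _split_result_str(result_str):
--     """
--     Helper function to split a string into a list of
--     (key, value) tuples while minding braces matching.
--     """
--     result = []
--     key = ''
--     value = ''
--     current = 'key'
--     braces = []
--     for ch in result_str:
--         if ch == '=' and not braces:
--             if current == 'key':
--                 current = 'value'
--         elif ch == ',' and not braces:
--             result.append((key, value))
--             key = ''
--             value = ''
--             if current == 'value':
--                 current = 'key'
--         else:
--             if ch in ['{', '[']:
--                 braces.append(ch)
--             elif ch == ']':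
--                 if braces[-1] == '[':
--                     braces.pop()
--             elif ch == '}':
--                 if braces[-1] == '{':
--                     braces.pop()
--
--             if current == 'key':
--                 key += ch
--             elif current == 'value':
--                 value += ch
--
--     if not braces:
--         result.append((key, value))
--     return result
-- ===== SOURCE B (Python) =====
-- def _split_result_str(result_str):
--     """Two-pass rewrite: cut into top-level segments at depth-0 commas,
--     then split each segment at its first depth-0 '=' (dropping later ones)."""
--     # first pass: segments at depth-0 commas (trailing buffer only if stack empty)
--     segments = []
--     buf = []
--     braces = []
--     for ch in result_str:
--         if ch == ',' and not braces:
--             segments.append(buf)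
--             buf = []
--         else:
--             if ch in ('{', '['):
--                 braces.append(ch)
--             elif ch == ']':
--                 if braces[-1] == '[':
--                     braces.pop()
--             elif ch == '}':
--                 if braces[-1] == '{':
--                     braces.pop()
--             buf.append(ch)
--     if not braces:
--         segments.append(buf)
--     # second pass: per segment, key before first depth-0 '=', value after
--     # (every further depth-0 '=' is skipped)
--     result = []
--     for seg in segments:
--         key, value = [], []
--         stack = []
--         seen_eq = False
--         for ch in seg:
--             if ch == '=' and not stack:
--                 seen_eq = True
--                 continue
--             if ch in ('{', '['):
--                 stack.append(ch)
--             elif ch == ']' and stack and stack[-1] == '[':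
--                 stack.pop()
--             elif ch == '}' and stack and stack[-1] == '{':
--                 stack.pop()
--             (value if seen_eq else key).append(ch)
--         result.append((''.join(key), ''.join(value)))
--     return result
-- ===== Notes on version B (the rewrite author's own statement) =====
-- stated objective: alternative
-- what changed: Replaces A's single character loop with interleaved key/value/mode state by a two-pass pipeline: first cut the string into top-level segments at depth-0 commas, then split each segment at its first depth-0 '=' (skipping later ones).
-- outside the precondition, e.g. on _split_result_str(']'): A raises IndexError, B raises IndexError; on _split_result_str('}'): A raises IndexError, B raises IndexError
import Mathlib
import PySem

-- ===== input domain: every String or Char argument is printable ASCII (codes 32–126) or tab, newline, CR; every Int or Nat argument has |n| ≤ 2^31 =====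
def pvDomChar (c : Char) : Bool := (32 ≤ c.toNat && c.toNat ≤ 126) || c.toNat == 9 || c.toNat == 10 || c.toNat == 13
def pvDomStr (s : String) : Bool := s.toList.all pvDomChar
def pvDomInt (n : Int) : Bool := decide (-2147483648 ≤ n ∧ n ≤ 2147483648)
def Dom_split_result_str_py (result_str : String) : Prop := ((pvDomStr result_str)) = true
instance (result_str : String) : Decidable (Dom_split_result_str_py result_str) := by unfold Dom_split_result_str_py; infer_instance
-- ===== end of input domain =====

-- B re-decomposes A's one interleaved loop into a two-pass pipeline (segments, then key/value split); same cost ("alternative").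
-- A raises IndexError on a stray ']'/'}' at nesting depth 0; those inputs are excluded by Pre_ (B raises there too).

-- ===== PORT A =====
-- Python braces list modelled with its top as the list head; current ('key'/'value') as Bool curKey.
-- Brace step shared by both Pythons verbatim: push on '{'/'[', pop on matching closer,
-- `none` = Python's IndexError on braces[-1] with an empty stack.
def pvBraceStep (ch : Char) (braces : List Char) : Option (List Char) :=
  if ch = '{' ∨ ch = '[' then some (ch :: braces)
  else if ch = ']' then
    match braces with
    | [] => none
    | t :: bs => if t = '[' then some bs else some (t :: bs)
  else if ch = '}' then
    match braces with
    | [] => none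
    | t :: bs => if t = '{' then some bs else some (t :: bs)
  else some braces

def pvALoop (cs : List Char) (result : List (String × String)) (key value : List Char)
    (curKey : Bool) (braces : List Char) :
    Option (List (String × String) × List Char × List Char × Bool × List Char) :=
  match cs with
  | [] => some (result, key, value, curKey, braces)
  | ch :: rest =>
    if ch = '=' ∧ braces = [] then
      pvALoop rest result key value (if curKey then false else curKey) braces
    else if ch = ',' ∧ braces = [] then
      pvALoop rest (result ++ [(String.mk key, String.mk value)]) [] []
        (if curKey then curKey else true) braces
    else
      match pvBraceStep ch braces with
      | none => none
      | some b' =>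
        if curKey then pvALoop rest result (key ++ [ch]) value curKey b'
        else pvALoop rest result key (value ++ [ch]) curKey b'

def split_result_str_py (result_str : String) : List (String × String) :=
  match pvALoop result_str.toList [] [] [] true [] with
  | none => []   -- Python raises IndexError here (outside Pre_)
  | some (result, key, value, _, braces) =>
    if braces = [] then result ++ [(String.mk key, String.mk value)] else result

-- ===== PORT B =====
-- first pass: cut into top-level segments at depth-0 commas (same push/pop rule, may "raise")
def pvCutSegs (cs : List Char) (segs : List (List Char)) (buf braces : List Char) :
    Option (List (List Char) × List Char × List Char) :=
  match cs with
  | [] => some (segs, buf, braces)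
  | ch :: rest =>
    if ch = ',' ∧ braces = [] then pvCutSegs rest (segs ++ [buf]) [] braces
    else
      match pvBraceStep ch braces with
      | none => none
      | some b' => pvCutSegs rest segs (buf ++ [ch]) b'

-- second pass inner loop: guarded (total) brace step
def pvBUpdate (ch : Char) (st : List Char) : List Char :=
  if ch = '{' ∨ ch = '[' then ch :: st
  else
    match st with
    | [] => st
    | t :: bs => if (ch = ']' ∧ t = '[') ∨ (ch = '}' ∧ t = '{') then bs else t :: bs

-- second pass: split a segment at its first depth-0 '='; skip every later depth-0 '='
def pvSegRun (cs : List Char) (seenEq : Bool) (stack key value : List Char) :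
    Bool × List Char × List Char × List Char :=
  match cs with
  | [] => (seenEq, stack, key, value)
  | ch :: rest =>
    if ch = '=' ∧ stack = [] then pvSegRun rest true stack key value
    else
      let st' := pvBUpdate ch stack
      if seenEq then pvSegRun rest seenEq st' key (value ++ [ch])
      else pvSegRun rest seenEq st' (key ++ [ch]) value

def pvSegSplit (seg : List Char) : String × String :=
  let r := pvSegRun seg false [] [] []
  (String.mk r.2.2.1, String.mk r.2.2.2)

def split_result_str_py_alt (result_str : String) : List (String × String) :=
  match pvCutSegs result_str.toList [] [] [] with
  | none => []   -- Python raises IndexError here (outside Pre_)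
  | some (segs, buf, braces) =>
    (if braces = [] then segs ++ [buf] else segs).map pvSegSplit

-- ===== PRECONDITION & SPEC =====
-- Pre_ excludes exactly the inputs where Python A raises IndexError: a ']' or '}' read while the brace stack is empty.
def Pre_split_result_str_py (result_str : String) : Prop :=
  (result_str.toList.foldl
    (fun (st : Option (List Char)) ch =>
      match st with
      | none => none
      | some braces =>
        if ch = '{' ∨ ch = '[' then some (ch :: braces)
        else if ch = ']' ∨ ch = '}' then
          match braces with
          | [] => none
          | t :: bs => if (ch = ']' ∧ t = '[') ∨ (ch = '}' ∧ t = '{') then some bs else some (t :: bs)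
        else some braces)
    (some [])).isSome = true
instance (result_str : String) : Decidable (Pre_split_result_str_py result_str) := by
  unfold Pre_split_result_str_py; infer_instance

def pvWitness_split_result_str_py : String := "a=1,b={x=2,y=[3,4]},c"

def Spec_split_result_str_py (result_str : String) (out : List (String × String)) : Prop := out = split_result_str_py_alt result_str
instance (result_str : String) (out : List (String × String)) : Decidable (Spec_split_result_str_py result_str out) := by unfold Spec_split_result_str_py; infer_instance

-- ===== CLAIM (what is proved, stated in full; the proofs are below) =====
def Claim_equal_split_result_str_py : Prop := ∀ (result_str : String), Dom_split_result_str_py result_str → Pre_split_result_str_py result_str → Spec_split_result_str_py result_str (split_result_str_py result_str)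

-- ===== LEMMAS AND PROOFS =====

-- pvBraceStep and pvBUpdate agree whenever pvBraceStep does not raise
theorem pvBUpdate_of_step {ch : Char} {braces b' : List Char}
    (h : pvBraceStep ch braces = some b') : pvBUpdate ch braces = b' := by
  cases braces <;> simp only [pvBraceStep, pvBUpdate] at h ⊢ <;>
    split_ifs at h ⊢ <;> first | rfl | (exact Option.some.inj h) | simp_all

theorem pvSegRun_append (xs ys : List Char) (s : Bool) (st k v : List Char) :
    pvSegRun (xs ++ ys) s st k v =
      (let r := pvSegRun xs s st k v; pvSegRun ys r.1 r.2.1 r.2.2.1 r.2.2.2) := by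
  induction xs generalizing s st k v with
  | nil => simp [pvSegRun]
  | cons c rest ih =>
    simp only [List.cons_append, pvSegRun]
    split_ifs with h1 h2 <;> simp [ih]

-- invariant simulation: A's loop state corresponds to B's first-pass state + a replayed segment run
theorem pvMain (cs : List Char) :
    ∀ (result : List (String × String)) (segs : List (List Char))
      (key value : List Char) (curKey : Bool) (braces buf : List Char),
      result = segs.map pvSegSplit →
      pvSegRun buf false [] [] [] = (!curKey, braces, key, value) →
      (match pvALoop cs result key value curKey braces with
       | none => ([] : List (String × String))
       | some (r, k, v, _, b) =>
         if b = [] then r ++ [(String.mk k, String.mk v)] else r) =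
      (match pvCutSegs cs segs buf braces with
       | none => []
       | some (sg, bf, b) => (if b = [] then sg ++ [bf] else sg).map pvSegSplit) := by
  induction cs with
  | nil =>
    intro result segs key value curKey braces buf hres hseg
    simp only [pvALoop, pvCutSegs]
    by_cases hb : braces = []
    · subst hb
      simp [hres, pvSegSplit, hseg]
    · simp [hb, hres]
  | cons ch rest ih =>
    intro result segs key value curKey braces buf hres hseg
    by_cases heq : ch = '=' ∧ braces = []
    · -- '=' at depth 0: A switches mode, B buffers the '=' which pvSegRun skips
      obtain ⟨hch, hb⟩ := heq
      subst hch hb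
      have h1 : pvALoop ('=' :: rest) result key value curKey [] =
          pvALoop rest result key value (if curKey then false else curKey) [] := rfl
      have h2 : pvCutSegs ('=' :: rest) segs buf [] =
          pvCutSegs rest segs (buf ++ ['=']) [] := rfl
      rw [h1, h2]
      have hcur : (if curKey then false else curKey) = false := by cases curKey <;> rfl
      rw [hcur]
      apply ih _ _ _ _ _ _ _ hres
      rw [pvSegRun_append]
      simp only [hseg]
      cases curKey <;> rfl
    · by_cases hco : ch = ',' ∧ braces = []
      · -- ',' at depth 0: A commits (key,value), B commits the buffer as a segment
        obtain ⟨hch, hb⟩ := hco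
        subst hch hb
        have h1 : pvALoop (',' :: rest) result key value curKey [] =
            pvALoop rest (result ++ [(String.mk key, String.mk value)]) [] []
              (if curKey then curKey else true) [] := rfl
        have h2 : pvCutSegs (',' :: rest) segs buf [] =
            pvCutSegs rest (segs ++ [buf]) [] [] := rfl
        rw [h1, h2]
        have hmap : (result ++ [(String.mk key, String.mk value)]) = (segs ++ [buf]).map pvSegSplit := by
          simp [hres, pvSegSplit, hseg]
        have hcur : (if curKey then curKey else true) = true := by cases curKey <;> rfl
        rw [hcur]
        apply ih _ _ _ _ _ _ _ hmap
        rfl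
      · -- ordinary character: both sides step the same brace stack and buffer it
        simp only [pvALoop, pvCutSegs, if_neg heq, if_neg hco]
        cases hstep : pvBraceStep ch braces with
        | none => simp
        | some b' =>
          simp only []
          have hsegstep : pvSegRun (buf ++ [ch]) false [] [] [] =
              (!curKey, b', (if curKey then key ++ [ch] else key),
                (if curKey then value else value ++ [ch])) := by
            rw [pvSegRun_append, hseg]
            simp only [pvSegRun]
            have hnot : ¬ (ch = '=' ∧ braces = []) := heq
            rw [if_neg hnot, pvBUpdate_of_step hstep]
            cases curKey <;> simp
          cases curKey with
          | true =>
            apply ih _ _ _ _ _ _ _ hres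
            simpa using hsegstep
          | false =>
            simp only [Bool.false_eq_true, if_neg (by simp : ¬ (False : Prop))]
            apply ih _ _ _ _ _ _ _ hres
            simpa using hsegstep

-- ===== VERDICT (by name: the statement is the Claim_ definition above) =====
theorem split_result_str_py_spec : Claim_equal_split_result_str_py := by
  intro s _ _
  unfold Spec_split_result_str_py split_result_str_py split_result_str_py_alt
  exact pvMain s.toList [] [] [] [] true [] [] (by simp) (by simp [pvSegRun])
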